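-- pv_equiv track=rewrite | github.com/Naereen/ALGO1-Info1-2019 | CoursMagistral_3.py | plus_bas
-- ===== SOURCE A (Python) =====
-- def plus_bas(points):
--     """ Trouve le point (xa, ya) le plus en bas à gauche, en temps linéaire."""
--     n = len(points)
--     xa, ya = points[0]
--     for j in range(1, n):
--         xj, yj = points[j]
--         if (ya > yj) or (ya == yj and xa > xj):
--             xa, ya = xj, yj
--     return xa, ya
-- ===== SOURCE B (Python) =====
-- def plus_bas(points):
--     """ Trouve le point (xa, ya) le plus en bas a gauche, via un tri stable."""
--     best = sorted(points, key=lambda p: (p[1], p[0]))[0]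
--     return best[0], best[1]
-- ===== Notes on version B (the rewrite author's own statement) =====
-- stated objective: alternative
-- what changed: Replaces the manual keep-the-best linear scan by a stable sort on the key (y, x) followed by taking the first element; stability preserves A's keep-earliest tie-breaking.
import Mathlib
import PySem

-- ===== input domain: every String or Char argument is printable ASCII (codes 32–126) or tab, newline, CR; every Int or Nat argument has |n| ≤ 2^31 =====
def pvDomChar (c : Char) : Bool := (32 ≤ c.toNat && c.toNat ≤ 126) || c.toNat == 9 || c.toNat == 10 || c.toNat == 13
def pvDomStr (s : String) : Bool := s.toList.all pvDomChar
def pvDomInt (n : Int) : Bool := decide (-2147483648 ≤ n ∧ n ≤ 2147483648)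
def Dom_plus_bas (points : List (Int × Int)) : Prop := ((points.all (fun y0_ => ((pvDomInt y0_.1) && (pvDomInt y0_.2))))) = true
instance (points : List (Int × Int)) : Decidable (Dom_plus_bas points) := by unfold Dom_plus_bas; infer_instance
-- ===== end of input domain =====

-- B replaces A's manual keep-the-best linear scan by a stable sort on the key (y, x)
-- followed by taking the first element (alternative decomposition, not faster).


-- ===== PORT A =====
def plus_bas (points : List (Int × Int)) : Int × Int :=
  let n : Int := points.length
  -- xa, ya = points[0]  (IndexError on [], excluded by Pre_)
  let p0 := PySem.List.pyGetD points 0 (0, 0)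
  (PySem.List.pyRange 1 n 1).foldl
    (fun a j =>
      let pj := PySem.List.pyGetD points j (0, 0)
      if a.2 > pj.2 ∨ (a.2 = pj.2 ∧ a.1 > pj.1) then pj else a)
    p0

-- ===== PORT B =====
def plus_bas_alt (points : List (Int × Int)) : Int × Int :=
  match PySem.List.sorted2 points (fun p => p.2) (fun p => p.1) false with
  | [] => (0, 0)          -- sorted(points)[0] raises IndexError on [], excluded by Pre_
  | b :: _ => (b.1, b.2)

-- ===== PRECONDITION & SPEC =====
-- Both programs raise IndexError on the empty list (points[0]).
def Pre_plus_bas (points : List (Int × Int)) : Prop := points ≠ []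
instance (points : List (Int × Int)) : Decidable (Pre_plus_bas points) := by unfold Pre_plus_bas; infer_instance
def pvWitness_plus_bas : (List (Int × Int)) := [(2, 1), (0, 1), (3, 0)]
def Spec_plus_bas (points : List (Int × Int)) (out : Int × Int) : Prop := out = plus_bas_alt points
instance (points : List (Int × Int)) (out : Int × Int) : Decidable (Spec_plus_bas points out) := by unfold Spec_plus_bas; infer_instance

-- ===== CLAIM (what is proved, stated in full; the proofs are below) =====
def Claim_equal_plus_bas : Prop := ∀ (points : List (Int × Int)), Dom_plus_bas points → Pre_plus_bas points → Spec_plus_bas points (plus_bas points)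

-- ===== LEMMAS AND PROOFS =====

-- the comparison used by sorted2 with keys (·.2), (·.1) coincides with A's branch condition
lemma cond_eq (a b : Int × Int) :
    (decide (b.2 < a.2) || (!decide (a.2 < b.2) && decide (b.1 < a.1)))
      = decide (a.2 > b.2 ∨ (a.2 = b.2 ∧ a.1 > b.1)) := by
  by_cases h1 : b.2 < a.2 <;> by_cases h2 : a.2 < b.2 <;> by_cases h3 : b.1 < a.1 <;>
    simp [h1, h2, h3] <;> omega

-- the head of a foldl-of-insertBy over a nonempty accumulator is the keep-first minimum
lemma head_foldl_insertBy {P : Type} (lt : P → P → Bool) :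
    ∀ (t : List P) (y : P) (ys : List P),
      ∃ r, t.foldl (fun acc x => PySem.List.insertBy lt x acc) (y :: ys)
            = (t.foldl (fun m x => if lt x m then x else m) y) :: r := by
  intro t
  induction t with
  | nil => intro y ys; exact ⟨ys, rfl⟩
  | cons x t ih =>
    intro y ys
    by_cases h : lt x y
    · obtain ⟨r, hr⟩ := ih x (y :: ys)
      exact ⟨r, by simpa [PySem.List.insertBy, h] using hr⟩
    · obtain ⟨r, hr⟩ := ih y (PySem.List.insertBy lt x ys)
      exact ⟨r, by simpa [PySem.List.insertBy, h] using hr⟩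

-- ===== VERDICT (by name: the statement is the Claim_ definition above) =====
theorem plus_bas_spec : Claim_equal_plus_bas := by
  intro points _ hpre
  unfold Spec_plus_bas
  obtain ⟨p, t, rfl⟩ : ∃ p t, points = p :: t := by
    cases points with
    | nil => exact absurd rfl hpre
    | cons p t => exact ⟨p, t, rfl⟩
  -- A reduces to a keep-first-minimum fold over the tail
  have hA : plus_bas (p :: t)
      = t.foldl (fun a pj => if a.2 > pj.2 ∨ (a.2 = pj.2 ∧ a.1 > pj.1) then pj else a) p := by
    unfold plus_bas
    rw [PySem.List.foldl_pyRange_pyGetD' (p :: t) ((0 : Int), (0 : Int))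
        (fun a pj => if a.2 > pj.2 ∨ (a.2 = pj.2 ∧ a.1 > pj.1) then pj else a)
        (PySem.List.pyGetD (p :: t) 0 ((0 : Int), (0 : Int))) (a := 1) (by omega)]
    simp [PySem.List.pyGetD]
  -- B's sorted head is the same fold
  obtain ⟨r, hr⟩ := head_foldl_insertBy
    (fun (a b : Int × Int) => decide (a.2 < b.2) || (!decide (b.2 < a.2) && decide (a.1 < b.1))) t p []
  have hB : plus_bas_alt (p :: t)
      = t.foldl (fun m x =>
          if (decide (x.2 < m.2) || (!decide (m.2 < x.2) && decide (x.1 < m.1))) then x else m) p := by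
    unfold plus_bas_alt
    simp only [PySem.List.sorted2, List.foldl_cons, PySem.List.insertBy, Bool.false_eq_true, if_false]
    rw [hr]
  rw [hA, hB]
  congr 1
  funext m x
  rw [cond_eq m x]
  simp
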